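-- pv_equiv track=rewrite | github.com/FISAAI03/FISAAI_CODING_TEST | Python/PGS/LEVEL2/n^2 배열 자르기/조진원.py | solution
-- ===== SOURCE A (Python) =====
-- def solution(n, left, right):
--     answer = []
--
--     for number in range(left, right+1) :
--         row = number // n
--         col = number % n
--
--         k = max(row,col) + 1
--         answer.append(k)
--
--     return answer
-- ===== SOURCE B (Python) =====
-- def solution(n, left, right):
--     answer = []
--     start_row = left // n
--     end_row = right // n
--     for r in range(start_row, end_row + 1):
--         c0 = left % n if r == start_row else 0
--         c1 = right % n if r == end_row else n - 1
--         for c in range(c0, c1 + 1):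
--             answer.append(max(r, c) + 1)
--     return answer
-- ===== Notes on version B (the rewrite author's own statement) =====
-- stated objective: alternative
-- what changed: B walks the n-by-n grid row by row (computing one floor-division per endpoint and per-row column ranges) instead of computing divmod for every linear index left..right.
-- outside the precondition, e.g. on solution(0, 0, 3): A raises ZeroDivisionError, B raises ZeroDivisionError; on solution(-2, 0, 3): A returns [1, 0, 1, 0], B returns []
import Mathlib
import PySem

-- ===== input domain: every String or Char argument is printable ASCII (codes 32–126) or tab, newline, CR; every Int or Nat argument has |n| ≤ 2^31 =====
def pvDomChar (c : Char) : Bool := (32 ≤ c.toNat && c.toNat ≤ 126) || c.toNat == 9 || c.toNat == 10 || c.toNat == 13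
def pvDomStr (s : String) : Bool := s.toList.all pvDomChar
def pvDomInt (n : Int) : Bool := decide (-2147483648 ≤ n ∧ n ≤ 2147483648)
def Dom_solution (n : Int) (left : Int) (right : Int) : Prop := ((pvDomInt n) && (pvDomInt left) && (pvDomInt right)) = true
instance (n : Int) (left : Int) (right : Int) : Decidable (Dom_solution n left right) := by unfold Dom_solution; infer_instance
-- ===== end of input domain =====

-- B re-implements the slice row-by-row over the n×n grid (per-row column ranges) instead of
-- divmod on each linear index; same cost, different decomposition; restricted to n ≥ 1.


-- ===== PORT A =====
def solution (n : Int) (left : Int) (right : Int) : List Int :=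
  (PySem.List.pyRange left (right + 1) 1).foldl
    (fun answer number =>
      let row := PySem.Int.floordiv number n
      let col := PySem.Int.mod number n
      let k := max row col + 1
      answer ++ [k]) []

-- ===== PORT B =====
def solution_alt (n : Int) (left : Int) (right : Int) : List Int :=
  let startRow := PySem.Int.floordiv left n
  let endRow := PySem.Int.floordiv right n
  (PySem.List.pyRange startRow (endRow + 1) 1).foldl
    (fun answer r =>
      let c0 := if r = startRow then PySem.Int.mod left n else 0
      let c1 := if r = endRow then PySem.Int.mod right n else n - 1
      (PySem.List.pyRange c0 (c1 + 1) 1).foldl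
        (fun acc c => acc ++ [max r c + 1]) answer) []

-- ===== PRECONDITION & SPEC =====
-- Pre_ restricts to n ≥ 1, the task's natural domain (n is the side of an n×n grid): at n = 0
-- A raises ZeroDivisionError, and for n < 0 A's values are floor-division artifacts outside the
-- task's meaning, which B's row-by-row walk does not reproduce.
def Pre_solution (n : Int) (left : Int) (right : Int) : Prop := 1 ≤ n
instance (n : Int) (left : Int) (right : Int) : Decidable (Pre_solution n left right) := by unfold Pre_solution; infer_instance
def pvWitness_solution : Int × Int × Int := (3, 2, 5)
def Spec_solution (n : Int) (left : Int) (right : Int) (out : List Int) : Prop := out = solution_alt n left right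
instance (n : Int) (left : Int) (right : Int) (out : List Int) : Decidable (Spec_solution n left right out) := by unfold Spec_solution; infer_instance

-- ===== CLAIM (what is proved, stated in full; the proofs are below) =====
def Claim_equal_solution : Prop := ∀ (n : Int) (left : Int) (right : Int), Dom_solution n left right → Pre_solution n left right → Spec_solution n left right (solution n left right)

-- ===== LEMMAS AND PROOFS =====

-- append-accumulator foldl is a map
theorem foldl_append_map {α β : Type} (g : α → β) (xs : List α) (acc : List β) :
    xs.foldl (fun a x => a ++ [g x]) acc = acc ++ xs.map g := by
  induction xs generalizing acc with
  | nil => simp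
  | cons x xs ih => simp [List.foldl, ih]

-- append-of-list-accumulator foldl is a flatMap
theorem foldl_append_flat {α β : Type} (g : α → List β) (xs : List α) (acc : List β) :
    xs.foldl (fun a x => a ++ g x) acc = acc ++ xs.flatMap g := by
  induction xs generalizing acc with
  | nil => simp
  | cons x xs ih => simp [List.foldl, ih]

theorem flatMap_congr_mem {α β : Type} {xs : List α} {g g' : α → List β}
    (h : ∀ x ∈ xs, g x = g' x) : xs.flatMap g = xs.flatMap g' := by
  induction xs with
  | nil => rfl
  | cons x xs ih =>
    simp only [List.flatMap_cons, h x (List.mem_cons_self ..),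
      ih (fun y hy => h y (List.mem_cons_of_mem _ hy))]

-- one row of the grid: indices x with sr*n ≤ x < (sr+1)*n have floordiv x n = sr, mod x n = x - sr*n
theorem segment_eq (n sr a b : Int) (hn : 1 ≤ n) (ha : sr * n ≤ a) (hb : b ≤ (sr + 1) * n) :
    (PySem.List.pyRange a b 1).map
        (fun x => max (PySem.Int.floordiv x n) (PySem.Int.mod x n) + 1)
      = (PySem.List.pyRange (a - sr * n) (b - sr * n) 1).map (fun c => max sr c + 1) := by
  rw [PySem.List.pyRange_one, PySem.List.pyRange_one]
  have hlen : (b - sr * n - (a - sr * n)) = b - a := by ring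
  rw [hlen, List.map_map, List.map_map]
  apply List.map_congr_left
  intro k hk
  have hk' : (k : Int) < b - a := by
    have := List.mem_range.mp hk; omega
  have hx1 : sr * n ≤ a + k := by omega
  have hx2 : a + (k : Int) < (sr + 1) * n := by omega
  have hdiv : PySem.Int.floordiv (a + k) n = sr :=
    (PySem.Int.floordiv_eq_iff_of_pos (by omega)).mpr ⟨hx1, hx2⟩
  have hmod : PySem.Int.mod (a + k) n = a + k - sr * n := by
    have := PySem.Int.floordiv_mul_add_mod (a + k) n
    rw [hdiv] at this; omega
  simp only [Function.comp, hdiv, hmod]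
  congr 1
  omega


-- core: the linear map over left..right equals the row-by-row flatMap
theorem core (n : Int) (hn : 1 ≤ n) :
    ∀ (k : Nat) (l r : Int),
      PySem.Int.floordiv l n ≤ PySem.Int.floordiv r n →
      (PySem.Int.floordiv r n - PySem.Int.floordiv l n).toNat = k →
      (PySem.List.pyRange l (r + 1) 1).map
          (fun x => max (PySem.Int.floordiv x n) (PySem.Int.mod x n) + 1)
        = (PySem.List.pyRange (PySem.Int.floordiv l n) (PySem.Int.floordiv r n + 1) 1).flatMap
            (fun row =>
              (PySem.List.pyRange
                  (if row = PySem.Int.floordiv l n then PySem.Int.mod l n else 0)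
                  ((if row = PySem.Int.floordiv r n then PySem.Int.mod r n else n - 1) + 1)
                  1).map (fun c => max row c + 1)) := by
  have hpos : (0:Int) < n := by omega
  intro k
  induction k with
  | zero =>
    intro l r hle h0
    set sr := PySem.Int.floordiv l n with hsr
    have her : PySem.Int.floordiv r n = sr := by omega
    rw [her]
    have hl := (PySem.Int.floordiv_eq_iff_of_pos hpos).mp hsr.symm
    have hr := (PySem.Int.floordiv_eq_iff_of_pos hpos).mp her
    have hml : PySem.Int.mod l n = l - sr * n := by
      have h := PySem.Int.floordiv_mul_add_mod l n; rw [← hsr] at h; linarith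
    have hmr : PySem.Int.mod r n = r - sr * n := by
      have h := PySem.Int.floordiv_mul_add_mod r n; rw [her] at h; linarith
    rw [PySem.List.pyRange_one_singleton]
    simp only [List.flatMap_cons, List.flatMap_nil, List.append_nil, if_pos rfl]
    rw [segment_eq n sr l (r + 1) hn hl.1 (by linarith [hr.2])]
    rw [hml, hmr]
    simp only [eq_self_iff_true, ite_true]
    congr 2
    ring
  | succ k ih =>
    intro l r hle hk
    set sr := PySem.Int.floordiv l n with hsr
    set er := PySem.Int.floordiv r n with herdef
    have hlt : sr < er := by omega
    have hl := (PySem.Int.floordiv_eq_iff_of_pos hpos).mp hsr.symm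
    have hr := (PySem.Int.floordiv_eq_iff_of_pos hpos).mp herdef.symm
    have hml : PySem.Int.mod l n = l - sr * n := by
      have h := PySem.Int.floordiv_mul_add_mod l n; rw [← hsr] at h; linarith
    have hmr : (sr + 1) * n ≤ er * n :=
      mul_le_mul_of_nonneg_right (by omega) (by omega)
    have hm_le_r : (sr + 1) * n ≤ r := le_trans hmr hr.1
    have hlm : l < (sr + 1) * n := hl.2
    have hfm : PySem.Int.floordiv ((sr + 1) * n) n = sr + 1 :=
      (PySem.Int.floordiv_eq_iff_of_pos hpos).mpr
        ⟨le_refl _, mul_lt_mul_of_pos_right (by omega) hpos⟩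
    have hmm : PySem.Int.mod ((sr + 1) * n) n = 0 := by
      have h := PySem.Int.floordiv_mul_add_mod ((sr + 1) * n) n
      rw [hfm] at h; linarith
    rw [PySem.List.pyRange_one_append l ((sr + 1) * n) (r + 1) (le_of_lt hlm) (by omega),
      List.map_append,
      PySem.List.pyRange_one_cons (show sr < er + 1 by omega), List.flatMap_cons]
    have H := ih ((sr + 1) * n) r (by rw [hfm, ← herdef]; omega) (by rw [hfm, ← herdef]; omega)
    rw [hfm, hmm, ← herdef] at H
    congr 1
    · -- first (possibly partial) row
      rw [segment_eq n sr l ((sr + 1) * n) hn hl.1 (le_refl _)]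
      rw [if_pos rfl, if_neg (show sr ≠ er by omega), hml]
      congr 2
      ring
    · -- remaining rows via the induction hypothesis
      rw [H]
      apply flatMap_congr_mem
      intro row hrow
      have hrowge : sr + 1 ≤ row := (PySem.List.mem_pyRange_one.mp hrow).1
      rw [if_neg (show row ≠ sr by omega), ite_self]


-- ===== VERDICT (by name: the statement is the Claim_ definition above) =====
theorem solution_spec : Claim_equal_solution := by
  intro n l r hdom hpre
  have hpre' : (1:Int) <= n := hpre
  have hpos : (0:Int) < n := by omega
  have hA : solution n l r
      = (PySem.List.pyRange l (r + 1) 1).map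
          (fun x => max (PySem.Int.floordiv x n) (PySem.Int.mod x n) + 1) := by
    show (PySem.List.pyRange l (r + 1) 1).foldl
        (fun a x => a ++ [max (PySem.Int.floordiv x n) (PySem.Int.mod x n) + 1]) [] = _
    rw [foldl_append_map]
    rfl
  have hB : solution_alt n l r
      = (PySem.List.pyRange (PySem.Int.floordiv l n) (PySem.Int.floordiv r n + 1) 1).flatMap
          (fun row =>
            (PySem.List.pyRange
                (if row = PySem.Int.floordiv l n then PySem.Int.mod l n else 0)
                ((if row = PySem.Int.floordiv r n then PySem.Int.mod r n else n - 1) + 1)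
                1).map (fun c => max row c + 1)) := by
    show (PySem.List.pyRange (PySem.Int.floordiv l n) (PySem.Int.floordiv r n + 1) 1).foldl
        (fun answer row =>
          (PySem.List.pyRange
              (if row = PySem.Int.floordiv l n then PySem.Int.mod l n else 0)
              ((if row = PySem.Int.floordiv r n then PySem.Int.mod r n else n - 1) + 1)
              1).foldl (fun acc c => acc ++ [max row c + 1]) answer) [] = _
    simp only [foldl_append_map]
    rw [foldl_append_flat]
    rfl
  unfold Spec_solution
  rw [hA, hB]
  by_cases hle : PySem.Int.floordiv l n <= PySem.Int.floordiv r n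
  · exact core n hpre' _ l r hle rfl
  · have hmono : r < l := by
      by_contra hc
      push_neg at hc
      have : PySem.Int.floordiv l n <= PySem.Int.floordiv r n := by
        rw [PySem.Int.floordiv_eq_ediv_of_pos hpos, PySem.Int.floordiv_eq_ediv_of_pos hpos]
        exact Int.ediv_le_ediv hpos hc
      exact hle this
    rw [PySem.List.pyRange_one_eq_nil (by omega),
      PySem.List.pyRange_one_eq_nil (show PySem.Int.floordiv r n + 1 <= PySem.Int.floordiv l n by omega)]
    rfl
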